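-- pv_equiv track=rewrite | github.com/fatih045/BinanceAutoTrader | app/strategy_service.py | generate_final_decision
-- ===== SOURCE A (Python) =====
-- def generate_final_decision(signals: dict):
--     """
--     Tüm sinyallerden genel bir alım-satım kararı üretir.
--     """
--     buy_signals = sum(1 for signal in signals.values() if signal == "buy")
--     sell_signals = sum(1 for signal in signals.values() if signal == "sell")
--     hold_signals = sum(1 for signal in signals.values() if signal == "hold")
--
--     # Strateji: Alım-Satım-Hold mantığı
--     if buy_signals > sell_signals and buy_signals >= hold_signals:
--         return "buy"
--     elif sell_signals > buy_signals and sell_signals >= hold_signals: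
--         return "sell"
--     else:
--         return "hold"
-- ===== SOURCE B (Python) =====
-- def generate_final_decision(signals: dict):
--     """Single pass maintaining pairwise vote margins (no counts ever built);
--     the decision reads only the signs of the margins."""
--     bs = 0  # buy - sell margin
--     bh = 0  # buy - hold margin
--     sh = 0  # sell - hold margin
--     for sig in signals.values():
--         if sig == "buy":
--             bs += 1
--             bh += 1
--         elif sig == "sell":
--             bs -= 1
--             sh += 1
--         elif sig == "hold":
--             bh -= 1
--             sh -= 1
--     if bs > 0 and bh >= 0:
--         return "buy"
--     if bs < 0 and sh >= 0:
--         return "sell"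
--     return "hold"
-- ===== Notes on version B (the rewrite author's own statement) =====
-- stated objective: alternative
-- what changed: Replaces A's three separate counting scans and count comparisons with one pass that maintains only the three pairwise vote margins (buy-sell, buy-hold, sell-hold); the final decision is read off the signs of these margins, no counts are ever computed.
import Mathlib
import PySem

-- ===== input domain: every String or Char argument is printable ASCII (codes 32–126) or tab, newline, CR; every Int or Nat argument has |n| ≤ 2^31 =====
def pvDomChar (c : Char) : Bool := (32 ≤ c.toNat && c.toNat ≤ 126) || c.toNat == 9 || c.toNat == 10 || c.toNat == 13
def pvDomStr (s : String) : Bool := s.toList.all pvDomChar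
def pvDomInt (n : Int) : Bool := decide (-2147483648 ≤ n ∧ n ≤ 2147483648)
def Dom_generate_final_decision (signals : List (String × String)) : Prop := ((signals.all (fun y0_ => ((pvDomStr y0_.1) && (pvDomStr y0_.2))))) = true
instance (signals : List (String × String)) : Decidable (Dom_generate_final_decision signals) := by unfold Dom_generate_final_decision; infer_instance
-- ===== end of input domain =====

-- B replaces A's three counting scans with one pass over pairwise vote margins (buy-sell, buy-hold, sell-hold); the decision reads only margin signs (alternative algorithm, same cost).


-- ===== PORT A =====
def generate_final_decision (signals : List (String × String)) : String :=
  let vals := signals.map (·.2)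
  let buy_signals : Int := vals.foldl (fun acc signal => if signal = "buy" then acc + 1 else acc) 0
  let sell_signals : Int := vals.foldl (fun acc signal => if signal = "sell" then acc + 1 else acc) 0
  let hold_signals : Int := vals.foldl (fun acc signal => if signal = "hold" then acc + 1 else acc) 0
  if buy_signals > sell_signals ∧ buy_signals ≥ hold_signals then "buy"
  else if sell_signals > buy_signals ∧ sell_signals ≥ hold_signals then "sell"
  else "hold"

-- ===== PORT B =====
-- one pass updating the three pairwise margins, as in Source B
def generate_final_decision_alt (signals : List (String × String)) : String :=
  let m : Int × Int × Int :=
    (signals.map (·.2)).foldl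
      (fun (st : Int × Int × Int) sig =>
        if sig = "buy" then (st.1 + 1, st.2.1 + 1, st.2.2)
        else if sig = "sell" then (st.1 - 1, st.2.1, st.2.2 + 1)
        else if sig = "hold" then (st.1, st.2.1 - 1, st.2.2 - 1)
        else st)
      (0, 0, 0)
  if m.1 > 0 ∧ m.2.1 ≥ 0 then "buy"
  else if m.1 < 0 ∧ m.2.2 ≥ 0 then "sell"
  else "hold"

-- ===== PRECONDITION & SPEC =====
def Spec_generate_final_decision (signals : List (String × String)) (out : String) : Prop := out = generate_final_decision_alt signals
instance (signals : List (String × String)) (out : String) : Decidable (Spec_generate_final_decision signals out) := by unfold Spec_generate_final_decision; infer_instance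

-- ===== CLAIM (what is proved, stated in full; the proofs are below) =====
def Claim_equal_generate_final_decision : Prop := ∀ (signals : List (String × String)), Dom_generate_final_decision signals → Spec_generate_final_decision signals (generate_final_decision signals)

-- ===== LEMMAS AND PROOFS =====
theorem pv_foldl_count (v : String) (vals : List String) (acc : Int) :
    vals.foldl (fun acc s => if s = v then acc + 1 else acc) acc = acc + vals.count v := by
  induction vals generalizing acc with
  | nil => simp
  | cons x xs ih =>
      simp only [List.foldl_cons, List.count_cons, ih]
      by_cases h : x = v
      · simp [h]; ring
      · simp [h]

theorem pv_margin_fold (vals : List String) (a b c : Int) :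
    vals.foldl
      (fun (st : Int × Int × Int) sig =>
        if sig = "buy" then (st.1 + 1, st.2.1 + 1, st.2.2)
        else if sig = "sell" then (st.1 - 1, st.2.1, st.2.2 + 1)
        else if sig = "hold" then (st.1, st.2.1 - 1, st.2.2 - 1)
        else st)
      (a, b, c)
    = (a + vals.count "buy" - vals.count "sell",
       b + vals.count "buy" - vals.count "hold",
       c + vals.count "sell" - vals.count "hold") := by
  induction vals generalizing a b c with
  | nil => simp
  | cons x xs ih =>
      simp only [List.foldl_cons]
      by_cases h1 : x = "buy"
      · subst h1; simp [ih, List.count_cons, Prod.ext_iff]; push_cast; omega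
      · by_cases h2 : x = "sell"
        · subst h2; simp [ih, h1, List.count_cons, Prod.ext_iff]; push_cast; omega
        · by_cases h3 : x = "hold"
          · subst h3; simp [ih, h1, h2, List.count_cons, Prod.ext_iff]; push_cast; omega
          · simp [ih, h1, h2, h3, List.count_cons]

-- ===== VERDICT (by name: the statement is the Claim_ definition above) =====
theorem generate_final_decision_spec : Claim_equal_generate_final_decision := by
  intro signals _
  unfold Spec_generate_final_decision generate_final_decision generate_final_decision_alt
  simp only [pv_foldl_count, pv_margin_fold, zero_add]
  set vals := signals.map (·.2)
  set B : Int := (vals.count "buy" : Int)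
  set S : Int := (vals.count "sell" : Int)
  set H : Int := (vals.count "hold" : Int)
  by_cases hb : B > S ∧ B ≥ H
  · rw [if_pos hb, if_pos (by omega : B - S > 0 ∧ B - H ≥ 0)]
  · rw [if_neg hb, if_neg (by omega : ¬(B - S > 0 ∧ B - H ≥ 0))]
    by_cases hs : S > B ∧ S ≥ H
    · rw [if_pos hs, if_pos (by omega : B - S < 0 ∧ S - H ≥ 0)]
    · rw [if_neg hs, if_neg (by omega : ¬(B - S < 0 ∧ S - H ≥ 0))]
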